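-- pv_equiv track=rewrite | github.com/FrancisTan88/PBC | hw8/hw0509_q1.py | cal_f
-- ===== SOURCE A (Python) =====
-- def cal_f(points):
--     for i in range(1, 14):
--         if points.count(i) == 5:
--             return 500
--     for i in range(1, 14):
--         if points.count(i) == 4:
--             return 100
--     return 0
-- ===== SOURCE B (Python) =====
-- def cal_f(points):
--     c = {}
--     for p in points:
--         if 1 <= p <= 13:
--             c[p] = c.get(p, 0) + 1
--     v = c.values()
--     if 5 in v:
--         return 500
--     if 4 in v:
--         return 100
--     return 0
-- ===== Notes on version B (the rewrite author's own statement) =====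
-- stated objective: faster
-- what changed: Replaces A's 26 repeated list.count scans over two explicit 1..13 loops by a single pass that builds a frequency dict of the in-range values, then two membership tests on the dict's values.
import Mathlib
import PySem

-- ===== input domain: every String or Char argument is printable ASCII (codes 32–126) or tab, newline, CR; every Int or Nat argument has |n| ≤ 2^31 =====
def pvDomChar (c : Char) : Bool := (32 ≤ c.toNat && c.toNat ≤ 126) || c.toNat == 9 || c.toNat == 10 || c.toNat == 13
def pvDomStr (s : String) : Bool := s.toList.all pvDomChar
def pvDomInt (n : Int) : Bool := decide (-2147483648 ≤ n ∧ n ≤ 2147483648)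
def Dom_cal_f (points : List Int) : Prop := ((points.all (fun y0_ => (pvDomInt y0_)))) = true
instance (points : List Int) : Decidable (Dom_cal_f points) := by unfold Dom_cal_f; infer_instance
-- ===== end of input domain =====

-- B replaces A's 26 repeated `.count` scans over the list by one frequency-dict pass
-- followed by membership tests on the dict's values (objective: simpler / faster).

-- ===== PORT A =====
-- Each of A's two `for i in range(1,14)` loops returns a constant at the first hit,
-- so each loop is exactly an `any` over the range.
def cal_f (points : List Int) : Int :=
  if (PySem.List.pyRange 1 14 1).any (fun i => points.count i == 5) then 500
  else if (PySem.List.pyRange 1 14 1).any (fun i => points.count i == 4) then 100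
  else 0

-- ===== PORT B =====
def cal_f_alt (points : List Int) : Int :=
  let c := points.foldl
    (fun d p => if 1 ≤ p ∧ p ≤ 13 then d.insert p (d.getD p 0 + 1) else d)
    (PySem.Dict.empty : PySem.Dict Int Int)
  let v := c.values
  if v.contains 5 then 500
  else if v.contains 4 then 100
  else 0

-- ===== PRECONDITION & SPEC =====
def Spec_cal_f (points : List Int) (out : Int) : Prop := out = cal_f_alt points
instance (points : List Int) (out : Int) : Decidable (Spec_cal_f points out) := by unfold Spec_cal_f; infer_instance

-- ===== CLAIM =====
def Claim_equal_cal_f : Prop := ∀ (points : List Int), Dom_cal_f points → Spec_cal_f points (cal_f points)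

-- ===== LEMMAS AND PROOFS =====

-- a conditional fold-step equals the unconditional fold over the filtered list
lemma foldl_if_filter {α β : Type} (P : α → Prop) [DecidablePred P]
    (step : β → α → β) (l : List α) (d : β) :
    l.foldl (fun d p => if P p then step d p else d) d
      = (l.filter (fun p => decide (P p))).foldl step d := by
  induction l generalizing d with
  | nil => rfl
  | cons x xs ih =>
    by_cases h : P x <;> simp [h, ih]

-- B's dict has values = the multiplicities of the in-range elements of `points`
lemma values_of_B (points : List Int) :
    (points.foldl
      (fun d p => if 1 ≤ p ∧ p ≤ 13 then d.insert p (d.getD p 0 + 1) else d)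
      (PySem.Dict.empty : PySem.Dict Int Int)).values
    = (PySem.Set.ofList (points.filter (fun p => decide (1 ≤ p ∧ p ≤ 13)))).map
        (fun k => ((points.filter (fun p => decide (1 ≤ p ∧ p ≤ 13))).count k : Int)) := by
  have h := foldl_if_filter (fun p : Int => 1 ≤ p ∧ p ≤ 13)
        (fun d p => d.insert p (d.getD p 0 + 1)) points (PySem.Dict.empty : PySem.Dict Int Int)
  rw [h]
  rw [PySem.Dict.foldl_insert_getD_add_one_eq_counter]
  rw [PySem.Dict.values_eq_map_keys _ (PySem.Dict.nodup_keys_counter _) 0]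
  rw [PySem.Dict.keys_counter]
  refine List.map_congr_left ?_
  intro k _
  rw [PySem.Dict.getD_counter]

-- membership of a positive value n in B's dict values ↔ some i ∈ [1,13] occurs n times in points
lemma contains_iff (points : List Int) (n : Int) (hn : 0 < n) :
    ((points.foldl
      (fun d p => if 1 ≤ p ∧ p ≤ 13 then d.insert p (d.getD p 0 + 1) else d)
      (PySem.Dict.empty : PySem.Dict Int Int)).values.contains n = true)
    ↔ ∃ i : Int, 1 ≤ i ∧ i < 14 ∧ (points.count i : Int) = n := by
  rw [values_of_B]
  rw [List.contains_iff_mem]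
  simp only [List.mem_map, PySem.Set.mem_ofList, List.mem_filter]
  constructor
  · rintro ⟨k, ⟨hk, hrange⟩, hcnt⟩
    have h13 : 1 ≤ k ∧ k ≤ 13 := by simpa using hrange
    have hcnt' : ((points.filter (fun p => decide (1 ≤ p ∧ p ≤ 13))).count k : Int) = n := hcnt
    rw [List.count_filter (p := fun p : Int => decide (1 ≤ p ∧ p ≤ 13)) hrange] at hcnt'
    exact ⟨k, h13.1, by omega, hcnt'⟩
  · rintro ⟨i, h1, h2, hc⟩
    have hb : (decide (1 ≤ i ∧ i ≤ 13)) = true := by simp; omega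
    have hmem : i ∈ points := by
      have : 0 < points.count i := by
        by_contra h
        have h0 : points.count i = 0 := by omega
        rw [h0] at hc; simp at hc; omega
      exact List.count_pos_iff.mp this
    refine ⟨i, ⟨hmem, hb⟩, ?_⟩
    rw [List.count_filter (p := fun p : Int => decide (1 ≤ p ∧ p ≤ 13)) hb]
    exact hc

-- A's range-scan for count = n, as an existential
lemma any_iff (points : List Int) (n : Nat) :
    ((PySem.List.pyRange 1 14 1).any (fun i => points.count i == n) = true)
    ↔ ∃ i : Int, 1 ≤ i ∧ i < 14 ∧ (points.count i : Int) = (n : Int) := by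
  rw [List.any_eq_true]
  constructor
  · rintro ⟨i, hi, hc⟩
    have hm := (PySem.List.mem_pyRange_one).mp hi
    simp only [beq_iff_eq] at hc
    exact ⟨i, hm.1, hm.2, by exact_mod_cast hc⟩
  · rintro ⟨i, h1, h2, hc⟩
    refine ⟨i, (PySem.List.mem_pyRange_one).mpr ⟨h1, h2⟩, ?_⟩
    have : points.count i = n := by exact_mod_cast hc
    simp [this]

lemma main_eq (points : List Int) : cal_f points = cal_f_alt points := by
  unfold cal_f cal_f_alt
  have h5 := (contains_iff points 5 (by norm_num)).trans (any_iff points 5).symm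
  have h4 := (contains_iff points 4 (by norm_num)).trans (any_iff points 4).symm
  simp only [h5, h4]

-- ===== VERDICT =====
theorem cal_f_spec : Claim_equal_cal_f := by
  intro points _
  unfold Spec_cal_f
  exact main_eq points
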